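-- pv_equiv track=rewrite | github.com/shobhitmalkhede/Selenium-Test-on-BrowserStack | scraper.py | analyze_repeated_words
-- ===== SOURCE A (Python) =====
-- def analyze_repeated_words(article_data):
--     words = []
--     for article in article_data:
--         words.extend(article['translated_title'].split())
--
--     word_count = {}
--     for word in words:
--         word_count[word] = word_count.get(word, 0) + 1
--
--     repeated_words = {word: count for word, count in word_count.items() if count > 2}
--     return repeated_words
-- ===== SOURCE B (Python) =====
-- def analyze_repeated_words(article_data):
--     words = [w for article in article_data for w in article['translated_title'].split()]
--     # sort-then-scan counting: run-length encode the sorted word list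
--     sw = sorted(words)
--     counts = {}
--     i = 0
--     while i < len(sw):
--         j = i + 1
--         while j < len(sw) and sw[j] == sw[i]:
--             j += 1
--         counts[sw[i]] = j - i
--         i = j
--     # restore first-occurrence order and keep words with count > 2
--     return {w: counts[w] for w in dict.fromkeys(words) if counts[w] > 2}
-- ===== Notes on version B (the rewrite author's own statement) =====
-- stated objective: alternative
-- what changed: B counts by sorting the flattened word list and run-length scanning it (a sort-then-scan strategy) instead of A's incrementally hashed counter dict, then restores first-occurrence order with one dedup pass to emit words whose run length exceeds 2.
-- outside the precondition, e.g. on analyze_repeated_words([{}]): A raises KeyError, B raises KeyError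
import Mathlib
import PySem

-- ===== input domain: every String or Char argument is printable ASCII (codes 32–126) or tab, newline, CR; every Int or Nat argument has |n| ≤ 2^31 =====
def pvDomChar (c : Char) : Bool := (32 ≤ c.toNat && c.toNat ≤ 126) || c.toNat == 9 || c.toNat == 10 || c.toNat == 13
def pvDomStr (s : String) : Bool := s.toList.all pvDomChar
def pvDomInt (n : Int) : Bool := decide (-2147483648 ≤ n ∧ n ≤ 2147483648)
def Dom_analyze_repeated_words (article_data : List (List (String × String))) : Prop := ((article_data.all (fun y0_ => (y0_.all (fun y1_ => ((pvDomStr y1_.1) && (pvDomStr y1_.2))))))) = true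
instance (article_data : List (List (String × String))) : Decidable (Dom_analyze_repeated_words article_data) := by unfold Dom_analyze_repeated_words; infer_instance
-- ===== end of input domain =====

-- B counts words by sorting the flattened list and run-length scanning it, instead of A's hashed counter dict (objective: alternative).
-- ===== PORT A =====
def analyze_repeated_words (article_data : List (List (String × String))) : List (String × Int) :=
  let words := article_data.foldl (fun ws article =>
    ws ++ PySem.Str.split₀ (PySem.Dict.getD (PySem.Dict.mk article) "translated_title" "")) []
  let word_count := words.foldl (fun d w => d.insert w (d.getD w 0 + 1)) (PySem.Dict.empty : PySem.Dict String Int)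
  word_count.items.filter (fun wc => 2 < wc.2)

-- ===== PORT B =====
-- the outer while loop of Source B: one step per run of equal adjacent words (inner while = takeWhile)
def pvRunsB : List String → List (String × Int)
  | [] => []
  | w :: rest =>
    (w, ((rest.takeWhile (· == w)).length + 1 : Int)) :: pvRunsB (rest.dropWhile (· == w))
termination_by l => l.length
decreasing_by
  simp only [List.length_cons]
  exact Nat.lt_succ_of_le (List.length_dropWhile_le _ _)

def analyze_repeated_words_alt (article_data : List (List (String × String))) : List (String × Int) :=
  let words := article_data.flatMap (fun article =>
    PySem.Str.split₀ (PySem.Dict.getD (PySem.Dict.mk article) "translated_title" ""))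
  let sw := PySem.List.sorted words (fun x => x) false
  let counts := (pvRunsB sw).foldl (fun d p => d.insert p.1 p.2) (PySem.Dict.empty : PySem.Dict String Int)
  -- counts[w] ported as getD w 0: every word of `words` is a key of counts, so Python's counts[w] never raises here
  ((PySem.List.dedup words).filter (fun w => 2 < counts.getD w 0)).map
    (fun w => (w, counts.getD w 0))

-- ===== PRECONDITION & SPEC =====
-- Pre_ excludes exactly the inputs where Python A raises KeyError: an article without the key 'translated_title' (B raises there too).
def Pre_analyze_repeated_words (article_data : List (List (String × String))) : Prop :=
  ∀ article ∈ article_data, (PySem.Dict.mk article).contains "translated_title" = true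
instance (article_data : List (List (String × String))) : Decidable (Pre_analyze_repeated_words article_data) := by unfold Pre_analyze_repeated_words; infer_instance
def pvWitness_analyze_repeated_words : (List (List (String × String))) := [[("translated_title", "hi hi hi there")], [("translated_title", "there")]]
def Spec_analyze_repeated_words (article_data : List (List (String × String))) (out : List (String × Int)) : Prop := out = analyze_repeated_words_alt article_data
instance (article_data : List (List (String × String))) (out : List (String × Int)) : Decidable (Spec_analyze_repeated_words article_data out) := by unfold Spec_analyze_repeated_words; infer_instance

-- ===== CLAIM (what is proved, stated in full; the proofs are below) =====
def Claim_equal_analyze_repeated_words : Prop := ∀ (article_data : List (List (String × String))), Dom_analyze_repeated_words article_data → Pre_analyze_repeated_words article_data → Spec_analyze_repeated_words article_data (analyze_repeated_words article_data)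

-- ===== LEMMAS AND PROOFS =====
theorem foldl_append_f {α β : Type} (f : α → List β) (l : List α) (acc : List β) :
    l.foldl (fun ws a => ws ++ f a) acc = acc ++ l.flatMap f := by
  induction l generalizing acc with
  | nil => simp
  | cons a l ih => simp [List.foldl_cons, ih, List.append_assoc]

-- every key in the run-length encoding is an element of the list
theorem pvRunsB_fst_mem : ∀ (l : List String), ∀ p ∈ pvRunsB l, p.1 ∈ l := by
  intro l
  induction l using pvRunsB.induct with
  | case1 => simp [pvRunsB]
  | case2 w rest ih =>
    intro p hp
    rw [pvRunsB] at hp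
    rcases List.mem_cons.mp hp with h | h
    · simp [h]
    · exact List.mem_cons_of_mem _ ((List.dropWhile_sublist _).subset (ih p h))

-- on a (≤-)sorted list, the run-length encoding pairs each element with its count, with distinct keys
theorem pvRunsB_sorted_spec : ∀ (l : List String), l.Pairwise (· ≤ ·) →
    ((pvRunsB l).map Prod.fst).Nodup ∧ ∀ w ∈ l, (w, (l.count w : Int)) ∈ pvRunsB l := by
  intro l
  induction l using pvRunsB.induct with
  | case1 => simp [pvRunsB]
  | case2 w rest ih =>
    intro hp
    have hsplit : rest.takeWhile (· == w) ++ rest.dropWhile (· == w) = rest :=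
      List.takeWhile_append_dropWhile
    have htk : ∀ y ∈ rest.takeWhile (· == w), y = w := by
      intro y hy
      have := List.mem_takeWhile_imp hy
      simpa using this
    -- the dropped suffix is ≤-sorted and contains no copy of w
    have hrest_pw : rest.Pairwise (· ≤ ·) := hp.of_cons
    have hdp_pw : (rest.dropWhile (· == w)).Pairwise (· ≤ ·) :=
      hrest_pw.sublist (List.dropWhile_sublist _)
    have hw_not : w ∉ rest.dropWhile (· == w) := by
      intro hmem
      cases hd : rest.dropWhile (· == w) with
      | nil => rw [hd] at hmem; exact List.not_mem_nil hmem
      | cons h t =>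
        have hh_ne : ¬ (h == w) = true := by
          have := List.head?_dropWhile_not (· == w) rest
          rw [hd] at this
          simpa using this
        rw [hd] at hmem
        rcases List.mem_cons.mp hmem with heq | hmem'
        · exact hh_ne (by simp [heq])
        · -- h ≤ w (from pairwise within the suffix) and w ≤ h (from the head position) force h = w
          have hle1 : h ≤ w := by
            have hpc := List.pairwise_cons.mp (hd ▸ hdp_pw)
            exact hpc.1 w hmem'
          have hle2 : w ≤ h := by
            have hsub : h ∈ rest := (List.dropWhile_sublist _).subset (by rw [hd]; simp)
            exact (List.pairwise_cons.mp hp).1 h hsub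
          exact hh_ne (by simp [le_antisymm hle1 hle2])
    obtain ⟨ihnd, ihmem⟩ := ih hdp_pw
    constructor
    · rw [pvRunsB]
      simp only [List.map_cons, List.nodup_cons]
      refine ⟨?_, ihnd⟩
      intro hmem
      rcases List.mem_map.mp hmem with ⟨p, hp', hp1⟩
      have hm := pvRunsB_fst_mem _ p hp'
      rw [hp1] at hm
      exact hw_not hm
    · intro v hv
      rw [pvRunsB]
      by_cases hvw : v = w
      · subst hvw
        refine List.mem_cons.mpr (Or.inl ?_)
        have hcount : (v :: rest).count v = (rest.takeWhile (· == v)).length + 1 := by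
          conv_lhs => rw [← hsplit]
          rw [List.count_cons_self, List.count_append]
          have h1 : (rest.takeWhile (· == v)).count v = (rest.takeWhile (· == v)).length :=
            List.count_eq_length.mpr (fun y hy => by simp [htk y hy])
          have h2 : (rest.dropWhile (· == v)).count v = 0 :=
            List.count_eq_zero.mpr hw_not
          omega
        rw [hcount]
        push_cast
        rfl
      · refine List.mem_cons.mpr (Or.inr ?_)
        have hv' : v ∈ rest.dropWhile (· == w) := by
          rcases List.mem_cons.mp hv with heq | hv'
          · exact absurd heq hvw
          · rw [← hsplit] at hv'
            rcases List.mem_append.mp hv' with h | h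
            · exact absurd (htk v h) hvw
            · exact h
        have hcount : (w :: rest).count v = (rest.dropWhile (· == w)).count v := by
          have h0 : (rest.takeWhile (· == w)).count v = 0 :=
            List.count_eq_zero.mpr (fun h => hvw (htk v h))
          have hrr : rest.count v = (rest.dropWhile (· == w)).count v := by
            conv_lhs => rw [← hsplit]
            rw [List.count_append, h0]
            exact Nat.zero_add _
          rw [List.count_cons, hrr]
          simp [Ne.symm hvw]
        rw [hcount]
        exact ihmem v hv'

-- the counts dict of B looks up the count of any word of `words`
theorem counts_getD (words : List String) (w : String) (hw : w ∈ words) :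
    ((pvRunsB (PySem.List.sorted words (fun x => x) false)).foldl
        (fun d p => d.insert p.1 p.2) (PySem.Dict.empty : PySem.Dict String Int)).getD w 0
      = (words.count w : Int) := by
  set sw := PySem.List.sorted words (fun x => x) false with hsw
  have hperm : sw.Perm words := PySem.List.sorted_perm words (fun x => x) false
  have hpw : sw.Pairwise (· ≤ ·) := by
    have := PySem.List.sorted_pairwise (xs := words) (key := fun x => x)
    simpa [hsw] using this
  obtain ⟨hnd, hmem⟩ := pvRunsB_sorted_spec sw hpw
  have hwsw : w ∈ sw := hperm.mem_iff.mpr hw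
  have hitems : ((pvRunsB sw).foldl (fun d p => d.insert p.1 p.2)
      (PySem.Dict.empty : PySem.Dict String Int)).items = (pvRunsB sw).map (fun p => (p.1, p.2)) := by
    have := PySem.Dict.items_foldl_insert_fresh (pvRunsB sw) Prod.fst Prod.snd
      (PySem.Dict.empty : PySem.Dict String Int) (by simp) hnd
    simpa using this
  have hkeysnd : ((pvRunsB sw).foldl (fun d p => d.insert p.1 p.2)
      (PySem.Dict.empty : PySem.Dict String Int)).keys.Nodup := by
    simp only [PySem.Dict.keys, hitems]
    simpa using hnd
  have hin : (w, (sw.count w : Int)) ∈ ((pvRunsB sw).foldl (fun d p => d.insert p.1 p.2)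
      (PySem.Dict.empty : PySem.Dict String Int)).items := by
    rw [hitems]
    exact List.mem_map.mpr ⟨(w, (sw.count w : Int)), hmem w hwsw, rfl⟩
  rw [PySem.Dict.getD_of_mem_items _ hin hkeysnd 0]
  simp [List.Perm.count_eq hperm]

-- ===== VERDICT (by name: the statement is the Claim_ definition above) =====
theorem analyze_repeated_words_spec : Claim_equal_analyze_repeated_words := by
  intro article_data _ _
  simp only [Spec_analyze_repeated_words, analyze_repeated_words, analyze_repeated_words_alt,
    foldl_append_f, List.nil_append]
  generalize (article_data.flatMap (fun article =>
    PySem.Str.split₀ (PySem.Dict.getD (PySem.Dict.mk article) "translated_title" ""))) = words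
  rw [PySem.Dict.foldl_insert_getD_add_one_eq_counter, PySem.Dict.items_counter, List.filter_map,
    PySem.List.dedup_eq_ofList]
  have key : ∀ v ∈ PySem.Set.ofList words,
      ((pvRunsB (PySem.List.sorted words (fun x => x) false)).foldl
        (fun d p => d.insert p.1 p.2) (PySem.Dict.empty : PySem.Dict String Int)).getD v 0
      = (words.count v : Int) :=
    fun v hv => counts_getD words v ((PySem.Set.mem_ofList words v).mp hv)
  have hA : (PySem.Set.ofList words).filter
        ((fun wc => decide ((2 : Int) < wc.2)) ∘ fun k => (k, (words.count k : Int)))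
      = (PySem.Set.ofList words).filter (fun k => decide ((2 : Int) < (words.count k : Int))) :=
    List.filter_congr (fun k _ => by simp)
  have hfil : (PySem.Set.ofList words).filter (fun v => decide ((2 : Int) <
        ((pvRunsB (PySem.List.sorted words (fun x => x) false)).foldl
          (fun d p => d.insert p.1 p.2) (PySem.Dict.empty : PySem.Dict String Int)).getD v 0))
      = (PySem.Set.ofList words).filter (fun k => decide ((2 : Int) < (words.count k : Int))) :=
    List.filter_congr (fun v hv => by rw [key v hv])
  rw [hA, hfil]
  exact List.map_congr_left (fun v hv => by rw [key v (List.mem_of_mem_filter hv)])
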